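-- pv_equiv track=rewrite | github.com/vrglhuhu/deleter | duplicate_remover.py | remove_chars
-- ===== SOURCE A (Python) =====
-- def remove_chars(input_str):
--     # Create an empty set to keep track of unique characters
--     unique_chars = set()
--
--     # Create an empty string to store the result
--     result_str = ""
--
--     # Iterate through each character in the input string
--     for char in input_str:
--         # Check if the character is not in the unique_chars set, not a digit,
--         # and the count of the character in the input_str is 1
--         if not char.isdigit() and input_str.count(char) == 1 and char not in unique_chars:
--             # Add the character to the unique_chars set
--             unique_chars.add(char)
--             # Append the character to the result string
--             result_str += char
--
--     # use join method to return the result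
--     return result_str
-- ===== SOURCE B (Python) =====
-- def remove_chars(input_str):
--     # Single pass that maintains the surviving candidates directly: a character
--     # is inserted on first sight and deleted again the moment it repeats (no
--     # counting, no rescans); digits are dropped when joining the survivors.
--     once = {}    # chars seen exactly once so far, in first-occurrence order
--     dups = set()  # chars seen at least twice
--     for ch in input_str:
--         if ch in dups:
--             continue
--         if ch in once:
--             del once[ch]
--             dups.add(ch)
--         else:
--             once[ch] = None
--     return ''.join(ch for ch in once if not ch.isdigit())
-- ===== Notes on version B (the rewrite author's own statement) =====
-- stated objective: faster
-- what changed: Instead of A's rescanning test (str.count per character plus a seen-set), B keeps no counts at all: one pass maintains the candidate set itself, inserting a char into an ordered dict on first sight and deleting it on its first repeat (repeats remembered in a set), then joins the non-digit survivors.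
import Mathlib
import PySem

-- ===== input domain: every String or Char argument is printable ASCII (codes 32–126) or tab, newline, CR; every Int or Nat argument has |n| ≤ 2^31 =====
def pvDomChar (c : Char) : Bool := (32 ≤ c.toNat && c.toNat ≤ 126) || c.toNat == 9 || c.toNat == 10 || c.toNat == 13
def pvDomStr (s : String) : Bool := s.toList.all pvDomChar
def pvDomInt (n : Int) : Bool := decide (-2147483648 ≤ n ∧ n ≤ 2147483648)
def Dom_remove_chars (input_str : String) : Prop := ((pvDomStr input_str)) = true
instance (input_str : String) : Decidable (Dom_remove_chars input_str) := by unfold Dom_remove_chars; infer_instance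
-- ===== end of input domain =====

-- B replaces A's per-character rescan (str.count inside the loop) by one pass that
-- maintains the candidate set itself (insert on first sight, delete on first repeat);
-- same return value, no side effects.

-- ===== PORT A =====
def remove_chars (input_str : String) : String :=
  -- for char in input_str: if not char.isdigit() and input_str.count(char) == 1
  --                           and char not in unique_chars: add + append
  String.mk (input_str.toList.foldl
    (fun (st : PySem.Set Char × List Char) c =>
      if (!PySem.Chars.isdigit c && (PySem.Chars.count input_str.toList [c] == 1))
          && !(PySem.Set.contains st.1 c)
      then (PySem.Set.add st.1 c, st.2 ++ [c])
      else st)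
    (PySem.Set.empty, [])).2

-- ===== PORT B =====
def remove_chars_alt (input_str : String) : String :=
  -- once = {}; dups = set(); for ch: skip if in dups; del+mark if in once; else insert
  -- return ''.join(ch for ch in once if not ch.isdigit())
  let st := input_str.toList.foldl
    (fun (st : PySem.Dict Char (Option Unit) × PySem.Set Char) ch =>
      if PySem.Set.contains st.2 ch then st
      else if st.1.contains ch then (st.1.erase ch, PySem.Set.add st.2 ch)
      else (st.1.insert ch none, st.2))
    (PySem.Dict.empty, PySem.Set.empty)
  String.mk (st.1.keys.filter (fun ch => !PySem.Chars.isdigit ch))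

-- ===== PRECONDITION & SPEC =====
def Spec_remove_chars (input_str : String) (out : String) : Prop := out = remove_chars_alt input_str
instance (input_str : String) (out : String) : Decidable (Spec_remove_chars input_str out) := by unfold Spec_remove_chars; infer_instance

-- ===== CLAIM (what is proved, stated in full; the proofs are below) =====
def Claim_equal_remove_chars : Prop := ∀ (input_str : String), Dom_remove_chars input_str → Spec_remove_chars input_str (remove_chars input_str)

-- ===== LEMMAS AND PROOFS =====

-- str.count with a single-character needle counts character occurrences
theorem pvCountGoSingle (c : Char) : ∀ (fuel : Nat) (l : List Char) (acc : Nat), l.length ≤ fuel →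
    PySem.Chars.count.go [c] fuel l acc = acc + l.count c := by
  intro fuel
  induction fuel with
  | zero => intro l acc h; cases l with
    | nil => simp [PySem.Chars.count.go]
    | cons x t => simp at h
  | succ n ih => intro l acc h; cases l with
    | nil => simp [PySem.Chars.count.go]
    | cons x t =>
      simp only [PySem.Chars.count.go]
      by_cases hc : c = x
      · subst hc
        simp [List.isPrefixOf, ih t (acc + 1) (by simpa using h)]
        omega
      · simp [List.isPrefixOf, hc, ih t acc (by simpa using h), Ne.symm hc]

theorem pvCountSingle (cs : List Char) (c : Char) : PySem.Chars.count cs [c] = cs.count c := by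
  simp [PySem.Chars.count, pvCountGoSingle c cs.length cs 0 le_rfl]

-- A's loop: provided every kept character occurs at most once in the rest and is
-- not yet in the set, the loop appends exactly the filtered rest.
theorem pvLoopA (p : Char → Bool) :
    ∀ (r : List Char) (s : PySem.Set Char) (acc : List Char),
    (∀ c, p c = true → c ∈ r → r.count c ≤ 1 ∧ c ∉ s) →
    (r.foldl (fun (st : PySem.Set Char × List Char) c =>
        if p c && !(PySem.Set.contains st.1 c) then (PySem.Set.add st.1 c, st.2 ++ [c]) else st)
      (s, acc)).2 = acc ++ r.filter p := by
  intro r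
  induction r with
  | nil => simp
  | cons c r ih =>
    intro s acc h
    by_cases hp : p c = true
    · have hcs : c ∉ s := (h c hp (by simp)).2
      have hcr : c ∉ r := by
        intro hm
        have h1 := (h c hp (by simp)).1
        have h2 : 1 ≤ r.count c := List.one_le_count_iff.mpr hm
        simp at h1
        omega
      have hcont : PySem.Set.contains s c = false := by
        rw [← Bool.not_eq_true]
        intro hh
        exact hcs ((PySem.Set.contains_iff s c).mp hh)
      simp only [List.foldl_cons, hp, hcont, Bool.not_false, Bool.and_true, if_true]
      rw [ih (PySem.Set.add s c) (acc ++ [c]) ?_]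
      · simp [hp]
      · intro c' hp' hm'
        refine ⟨?_, ?_⟩
        · have := (h c' hp' (by simp [hm'])).1
          simp [List.count_cons] at this ⊢
          omega
        · intro hmem
          rcases (PySem.Set.mem_add s c c').mp hmem with h1 | h2
          · exact (h c' hp' (by simp [hm'])).2 h1
          · subst h2; exact hcr hm'
    · have hp' : p c = false := by simpa using hp
      simp only [List.foldl_cons, hp', Bool.false_and, Bool.false_eq_true, if_false]
      rw [ih s acc ?_]
      · simp [hp']
      · intro c' hq hm'
        refine ⟨?_, (h c' hq (by simp [hm'])).2⟩
        have := (h c' hq (by simp [hm'])).1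
        simp [List.count_cons] at this ⊢
        omega

-- B's loop invariant, by induction from the right: after processing xs, the dict
-- holds exactly the count-1 characters of xs (in occurrence order, value none) and
-- the set holds exactly the characters occurring at least twice.
theorem pvLoopB : ∀ (xs : List Char),
    (xs.foldl
      (fun (st : PySem.Dict Char (Option Unit) × PySem.Set Char) ch =>
        if PySem.Set.contains st.2 ch then st
        else if st.1.contains ch then (st.1.erase ch, PySem.Set.add st.2 ch)
        else (st.1.insert ch none, st.2))
      (PySem.Dict.empty, PySem.Set.empty)).1.items
        = (xs.filter (fun c => xs.count c == 1)).map (fun c => (c, (none : Option Unit)))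
    ∧ ∀ c : Char,
        c ∈ (xs.foldl
          (fun (st : PySem.Dict Char (Option Unit) × PySem.Set Char) ch =>
            if PySem.Set.contains st.2 ch then st
            else if st.1.contains ch then (st.1.erase ch, PySem.Set.add st.2 ch)
            else (st.1.insert ch none, st.2))
          (PySem.Dict.empty, PySem.Set.empty)).2 ↔ 2 ≤ xs.count c := by
  intro xs
  induction xs using List.reverseRecOn with
  | nil =>
    refine ⟨?_, ?_⟩
    · simp [PySem.Dict.empty]
    · intro c; simp [PySem.Set.empty]
  | append_singleton xs a ih =>
    obtain ⟨hd, hs⟩ := ih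
    rw [List.foldl_append, List.foldl_cons, List.foldl_nil]
    set st := xs.foldl
      (fun (st : PySem.Dict Char (Option Unit) × PySem.Set Char) ch =>
        if PySem.Set.contains st.2 ch then st
        else if st.1.contains ch then (st.1.erase ch, PySem.Set.add st.2 ch)
        else (st.1.insert ch none, st.2))
      (PySem.Dict.empty, PySem.Set.empty) with hst
    have hcnt : ∀ c : Char, (xs ++ [a]).count c = xs.count c + (if c = a then 1 else 0) := by
      intro c; by_cases h : c = a <;> simp [List.count_append, h, Ne.symm]
    -- dict membership characterisation
    have hdk : ∀ c : Char, st.1.contains c = true ↔ (xs.count c = 1 ∧ c ∈ xs) := by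
      intro c
      unfold PySem.Dict.contains
      rw [hd]
      simp only [List.any_eq_true, List.mem_map, List.mem_filter]
      constructor
      · rintro ⟨p, ⟨c', ⟨hc'mem, hc'cnt⟩, rfl⟩, hbeq⟩
        have : c' = c := by simpa using hbeq
        subst this
        exact ⟨by simpa using hc'cnt, hc'mem⟩
      · rintro ⟨h1, h2⟩
        exact ⟨(c, none), ⟨c, ⟨h2, by simp [h1]⟩, rfl⟩, by simp⟩
    rcases Nat.lt_or_ge (xs.count a) 1 with h0 | h1
    · -- fresh character: count 0, inserted
      have hca : xs.count a = 0 := by omega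
      have hna : a ∉ xs := by
        intro hm; have := List.one_le_count_iff.mpr hm; omega
      have hnset : PySem.Set.contains st.2 a = false := by
        rw [← Bool.not_eq_true]; intro hh
        have := (hs a).mp ((PySem.Set.contains_iff st.2 a).mp hh); omega
      have hndict : st.1.contains a = false := by
        rw [← Bool.not_eq_true]; intro hh
        exact hna ((hdk a).mp hh).2
      simp only [hnset, Bool.false_eq_true, if_false, hndict, if_false]
      constructor
      · rw [PySem.Dict.items_insert_of_not_contains _ _ hndict, hd]
        have hfa : (xs ++ [a]).filter (fun c => (xs ++ [a]).count c == 1)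
            = xs.filter (fun c => xs.count c == 1) ++ [a] := by
          rw [List.filter_append]
          congr 1
          · apply List.filter_congr
            intro c hc
            have hne : c ≠ a := fun h => hna (h ▸ hc)
            simp [hcnt c, hne]
          · simp [hca]
        rw [hfa, List.map_append]; rfl
      · intro c
        rw [hs c, hcnt c]
        by_cases h : c = a
        · subst h; simp [hca]
        · simp [h]
    · rcases Nat.lt_or_ge (xs.count a) 2 with h2 | h2
      · -- second occurrence: count 1, deleted from dict, marked duplicate
        have hca : xs.count a = 1 := by omega
        have hma : a ∈ xs := List.one_le_count_iff.mp (by omega)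
        have hnset : PySem.Set.contains st.2 a = false := by
          rw [← Bool.not_eq_true]; intro hh
          have := (hs a).mp ((PySem.Set.contains_iff st.2 a).mp hh); omega
        have hindict : st.1.contains a = true := (hdk a).mpr ⟨hca, hma⟩
        simp only [hnset, Bool.false_eq_true, if_false, hindict, if_true]
        constructor
        · show (st.1.erase a).items = _
          have hfa : (xs ++ [a]).filter (fun c => (xs ++ [a]).count c == 1)
              = xs.filter (fun c => (!(c, (none : Option Unit)).1 == a) && (xs.count c == 1)) := by
            rw [List.filter_append]
            have h2' : (List.filter (fun c => (xs ++ [a]).count c == 1) [a]) = [] := by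
              simp [hca]
            rw [h2', List.append_nil]
            apply List.filter_congr
            intro c hc
            by_cases h : c = a
            · subst h; simp [hca]
            · simp [hcnt c, h]
          have herase : (st.1.erase a).items
              = st.1.items.filter (fun p => !p.1 == a) := rfl
          rw [herase, hd, List.filter_map, List.filter_filter]
          exact (congrArg (List.map (fun c => (c, (none : Option Unit)))) hfa).symm
        · intro c
          rw [PySem.Set.mem_add, hs c, hcnt c]
          by_cases h : c = a
          · subst h; simp [hca]
          · simp [h]
      · -- already a known duplicate: skipped
        have hinset : PySem.Set.contains st.2 a = true :=
          (PySem.Set.contains_iff st.2 a).mpr ((hs a).mpr h2)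
        simp only [hinset, if_true]
        constructor
        · rw [hd]
          congr 1
          rw [List.filter_append]
          have h0 : (List.filter (fun c => (xs ++ [a]).count c == 1) [a]) = [] := by
            simp; omega
          rw [h0, List.append_nil]
          apply List.filter_congr
          intro c hc
          by_cases h : c = a
          · subst h
            have hx : xs.count c ≠ 1 := by omega
            have hz : xs.count c ≠ 0 := by omega
            simp [hcnt c, hx, hz]
          · simp [hcnt c, h]
        · intro c
          rw [hs c, hcnt c]
          by_cases h : c = a
          · subst h
            rw [show (if c = c then 1 else 0) = 1 from by simp]
            constructor <;> intro _ <;> omega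
          · simp [h]

-- ===== VERDICT (by name: the statement is the Claim_ definition above) =====
theorem remove_chars_spec : Claim_equal_remove_chars := by
  unfold Claim_equal_remove_chars Spec_remove_chars
  intro input_str _
  unfold remove_chars remove_chars_alt
  set l := input_str.toList with hl
  -- A's side
  rw [show (fun (st : PySem.Set Char × List Char) c =>
      if (!PySem.Chars.isdigit c && (PySem.Chars.count l [c] == 1)) && !(PySem.Set.contains st.1 c)
      then (PySem.Set.add st.1 c, st.2 ++ [c]) else st)
    = (fun (st : PySem.Set Char × List Char) c =>
      if (!PySem.Chars.isdigit c && (l.count c == 1)) && !(PySem.Set.contains st.1 c)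
      then (PySem.Set.add st.1 c, st.2 ++ [c]) else st) from by
      funext st c; rw [pvCountSingle]]
  rw [pvLoopA (fun c => !PySem.Chars.isdigit c && (l.count c == 1)) l PySem.Set.empty []
      (by intro c hc _; constructor
          · simp at hc; omega
          · simp [PySem.Set.empty])]
  -- B's side
  have hB := (pvLoopB l).1
  simp only []
  rw [show (PySem.Dict.keys _) = _ from congrArg (List.map Prod.fst) hB]
  rw [List.map_map, show (Prod.fst ∘ fun c => (c, (none : Option Unit))) = id from rfl,
      List.map_id, List.filter_filter, List.nil_append]
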